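-- pv_equiv track=rewrite | github.com/soundwow-ad/sec-manager | services_ragic_import.py | _fair_daily_spot_allocations
-- ===== SOURCE A (Python) =====
-- def _fair_daily_spot_allocations(daily_totals: list[int], n: int) -> list[list[int]]:
--     """
--     將每日總檔次公平拆給 n 支素材：每日合計不變、全走期各素材總檔次最多差 1，
--     且逐日依「尚欠目標」分配，使後續依檔次變化切段時列數盡量少。
--     """
--     if n <= 0:
--         return []
--     if n == 1:
--         return [[int(x) for x in daily_totals]]
--     total_sum = sum(int(x) for x in daily_totals)
--     target_per = [total_sum // n + (1 if i < total_sum % n else 0) for i in range(n)]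
--     cur = [0] * n
--     alloc_by_day: list[list[int]] = []
--     for T in daily_totals:
--         T = int(T)
--         base = T // n
--         rem = T % n
--         alloc = [base] * n
--         deficit = [(target_per[i] - cur[i] - base, -i) for i in range(n)]
--         deficit.sort(reverse=True)
--         for k in range(rem):
--             idx = -deficit[k][1]
--             alloc[idx] += 1
--         cur = [cur[i] + alloc[i] for i in range(n)]
--         alloc_by_day.append(alloc)
--     return alloc_by_day
-- ===== SOURCE B (Python) =====
-- def _fair_daily_spot_allocations(daily_totals: list[int], n: int) -> list[list[int]]:
--     if n <= 0:
--         return []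
--     if n == 1:
--         return [[int(x) for x in daily_totals]]
--     total_sum = sum(int(x) for x in daily_totals)
--     q = total_sum // n
--     r = total_sum % n
--     # remaining[i] = target_per[i] - cur[i]; its values always span at most two
--     # adjacent integers, so the rem largest deficits are found by linear scans.
--     remaining = [q + 1 if i < r else q for i in range(n)]
--     out: list[list[int]] = []
--     for T in daily_totals:
--         T = int(T)
--         base = T // n
--         rem = T % n
--         hi = max(remaining)
--         c = remaining.count(hi)
--         take_hi = rem if rem < c else c   # bumps: first take_hi entries at hi,
--         take_lo = rem - take_hi           # then first take_lo entries below hi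
--         row = []
--         new_remaining = []
--         for v in remaining:
--             if v == hi:
--                 bump = 1 if take_hi > 0 else 0
--                 take_hi -= bump
--             else:
--                 bump = 1 if take_lo > 0 else 0
--                 take_lo -= bump
--             a = base + bump
--             row.append(a)
--             new_remaining.append(v - a)
--         remaining = new_remaining
--         out.append(row)
--     return out
-- ===== Notes on version B (the rewrite author's own statement) =====
-- stated objective: faster
-- what changed: Each day's top-rem deficit selection is done by two linear scans (max, count, threshold pick) over the maintained remaining-target list, exploiting the invariant that remaining targets span at most two adjacent integers, instead of building and fully sorting the per-day deficit pair list.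
import Mathlib
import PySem

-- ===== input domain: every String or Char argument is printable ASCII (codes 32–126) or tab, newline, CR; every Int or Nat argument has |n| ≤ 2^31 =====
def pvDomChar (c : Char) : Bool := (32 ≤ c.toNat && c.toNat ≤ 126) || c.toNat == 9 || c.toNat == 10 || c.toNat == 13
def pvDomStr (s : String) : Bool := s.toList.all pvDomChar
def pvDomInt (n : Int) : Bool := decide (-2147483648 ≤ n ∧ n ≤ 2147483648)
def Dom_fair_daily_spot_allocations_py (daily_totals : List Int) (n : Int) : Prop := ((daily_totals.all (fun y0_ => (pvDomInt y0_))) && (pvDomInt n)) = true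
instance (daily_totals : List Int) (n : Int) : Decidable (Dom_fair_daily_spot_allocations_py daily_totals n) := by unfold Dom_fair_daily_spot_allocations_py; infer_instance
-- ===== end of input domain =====

-- B replaces A's per-day O(n log n) full sort of deficits by two linear scans that
-- exploit the invariant that the remaining per-material targets span at most two
-- adjacent integers; same return value, proved equal below.

-- ===== PORT A =====
-- one day of A: build the deficit pairs, sort them descending, bump the first rem indices
def pvA_day (n : Int) (target_per cur : List Int) (T : Int) : List Int :=
  let base := PySem.Int.floordiv T n
  let rem := PySem.Int.mod T n
  let deficit := PySem.List.sorted2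
      ((PySem.List.pyRange 0 n 1).map (fun i =>
        (PySem.List.pyGetD target_per i 0 - PySem.List.pyGetD cur i 0 - base, -i)))
      (fun p => p.1) (fun p => p.2) true
  (PySem.List.pyRange 0 rem 1).foldl (fun al k =>
      let idx := -(PySem.List.pyGetD deficit k (0, 0)).2
      PySem.List.pySetD al idx (PySem.List.pyGetD al idx 0 + 1))
    (List.replicate n.toNat base)

def fair_daily_spot_allocations_py (daily_totals : List Int) (n : Int) : List (List Int) :=
  if n ≤ 0 then []
  else if n = 1 then [daily_totals.map (fun x => x)]
  else
    let total_sum := daily_totals.foldl (fun s x => s + x) 0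
    let target_per := (PySem.List.pyRange 0 n 1).map (fun i =>
        PySem.Int.floordiv total_sum n + if i < PySem.Int.mod total_sum n then 1 else 0)
    (daily_totals.foldl (fun (st : List Int × List (List Int)) T =>
        let alloc := pvA_day n target_per st.1 T
        ((PySem.List.pyRange 0 n 1).map (fun i =>
            PySem.List.pyGetD st.1 i 0 + PySem.List.pyGetD alloc i 0),
         st.2 ++ [alloc]))
      (List.replicate n.toNat 0, [])).2

-- ===== PORT B =====
-- one day of B: hi = max(remaining); bump the first take_hi entries equal to hi and
-- the first take_lo of the others, in one scan; returns (take_hi, take_lo, row, new_remaining)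
def pvB_day (n : Int) (remaining : List Int) (T : Int) : Int × Int × List Int × List Int :=
  let base := PySem.Int.floordiv T n
  let rem := PySem.Int.mod T n
  let hi := (PySem.List.max? remaining (fun v => v)).getD 0
  let c : Int := (PySem.List.count remaining hi : Int)
  let take_hi := if rem < c then rem else c
  let take_lo := rem - take_hi
  remaining.foldl (fun (st : Int × Int × List Int × List Int) v =>
      if v = hi then
        let bump : Int := if 0 < st.1 then 1 else 0
        (st.1 - bump, st.2.1, st.2.2.1 ++ [base + bump], st.2.2.2 ++ [v - (base + bump)])
      else
        let bump : Int := if 0 < st.2.1 then 1 else 0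
        (st.1, st.2.1 - bump, st.2.2.1 ++ [base + bump], st.2.2.2 ++ [v - (base + bump)]))
    (take_hi, take_lo, [], [])

def fair_daily_spot_allocations_py_alt (daily_totals : List Int) (n : Int) : List (List Int) :=
  if n ≤ 0 then []
  else if n = 1 then [daily_totals.map (fun x => x)]
  else
    let total_sum := daily_totals.foldl (fun s x => s + x) 0
    let q := PySem.Int.floordiv total_sum n
    let r := PySem.Int.mod total_sum n
    (daily_totals.foldl (fun (st : List Int × List (List Int)) T =>
        let res := pvB_day n st.1 T
        (res.2.2.2, st.2 ++ [res.2.2.1]))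
      ((PySem.List.pyRange 0 n 1).map (fun i => if i < r then q + 1 else q), [])).2

-- ===== PRECONDITION & SPEC =====
def Spec_fair_daily_spot_allocations_py (daily_totals : List Int) (n : Int) (out : List (List Int)) : Prop := out = fair_daily_spot_allocations_py_alt daily_totals n
instance (daily_totals : List Int) (n : Int) (out : List (List Int)) : Decidable (Spec_fair_daily_spot_allocations_py daily_totals n out) := by unfold Spec_fair_daily_spot_allocations_py; infer_instance

-- ===== CLAIM (what is proved, stated in full; the proofs are below) =====
def Claim_equal_fair_daily_spot_allocations_py : Prop := ∀ (daily_totals : List Int) (n : Int), Dom_fair_daily_spot_allocations_py daily_totals n → Spec_fair_daily_spot_allocations_py daily_totals n (fair_daily_spot_allocations_py daily_totals n)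

-- ===== LEMMAS AND PROOFS =====

theorem pvSorted2_eq_sorted_lex (xs : List (Int × Int)) (rev : Bool) :
    PySem.List.sorted2 xs (fun p => p.1) (fun p => p.2) rev
      = PySem.List.sorted xs (fun p => (toLex p : Lex (Int × Int))) rev := by
  have hb : ∀ a b : Int × Int, (decide (a.1 < b.1) || (!decide (b.1 < a.1) && decide (a.2 < b.2)))
      = decide ((toLex a : Lex (Int × Int)) < toLex b) := by
    intro a b
    rcases lt_trichotomy a.1 b.1 with h | h | h
    · simp [Prod.Lex.lt_iff, h]
    · simp [Prod.Lex.lt_iff, h]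
    · simp [Prod.Lex.lt_iff, h, not_lt_of_gt h, ne_of_gt h]
  unfold PySem.List.sorted2 PySem.List.sorted
  cases rev <;> simp only [if_true] <;>
    simp only [funext fun a => funext fun b => hb a b, funext fun a => funext fun b => hb b a]

/-- the deficit pairs of a remaining-list `r`, enumerated from `s` -/
def pvE (base : Int) (r : List Int) (s : Int) : List (Int × Int) :=
  (PySem.List.enumerate r s).map (fun p => (p.2 - base, -p.1))

def pvHp (base hi : Int) (r : List Int) (s : Int) : List (Int × Int) :=
  (pvE base r s).filter (fun p => decide (p.1 = hi - base))

def pvLp (base hi : Int) (r : List Int) (s : Int) : List (Int × Int) :=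
  (pvE base r s).filter (fun p => !decide (p.1 = hi - base))

/-- the indices A bumps: first `th` hi-deficit ones, then first `tl` of the rest -/
def pvJ (base hi : Int) (r : List Int) (s : Int) (th tl : Nat) : List Int :=
  (((pvHp base hi r s).take th) ++ ((pvLp base hi r s).take tl)).map (fun p => -p.2)

/-- the per-day allocation both programs produce -/
def pvBumps (hi base th tl : Int) : List Int → List Int
  | [] => []
  | v :: r =>
    if v = hi then
      (base + if 0 < th then 1 else 0) :: pvBumps hi base (if 0 < th then th - 1 else th) tl r
    else
      (base + if 0 < tl then 1 else 0) :: pvBumps hi base th (if 0 < tl then tl - 1 else tl) r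

theorem pvE_cons (base v : Int) (r : List Int) (s : Int) :
    pvE base (v :: r) s = (v - base, -s) :: pvE base r (s + 1) := by
  simp [pvE, PySem.List.enumerate_cons]

theorem pvHp_cons (base hi v : Int) (r : List Int) (s : Int) :
    pvHp base hi (v :: r) s
      = if v = hi then (v - base, -s) :: pvHp base hi r (s + 1) else pvHp base hi r (s + 1) := by
  have h : (v - base = hi - base) ↔ (v = hi) := by omega
  simp only [pvHp, pvE_cons, List.filter_cons]
  by_cases hv : v = hi <;> simp [h, hv]

theorem pvLp_cons (base hi v : Int) (r : List Int) (s : Int) :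
    pvLp base hi (v :: r) s
      = if v = hi then pvLp base hi r (s + 1) else (v - base, -s) :: pvLp base hi r (s + 1) := by
  have h : (v - base = hi - base) ↔ (v = hi) := by omega
  simp only [pvLp, pvE_cons, List.filter_cons]
  by_cases hv : v = hi <;> simp [h, hv]

theorem pvE_mem (base : Int) (r : List Int) (s : Int) :
    ∀ p ∈ pvE base r s, s ≤ -p.2 ∧ -p.2 < s + r.length ∧ (p.2 = -(-p.2)) ∧ p.1 + base ∈ r := by
  intro p hp
  simp only [pvE, List.mem_map] at hp
  obtain ⟨q, hq, rfl⟩ := hp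
  rw [PySem.List.mem_enumerate_iff] at hq
  obtain ⟨k, hk, rfl⟩ := hq
  refine ⟨by omega, by omega, by omega, ?_⟩
  simp only []
  have : r[k] - base + base = r[k] := by omega
  rw [this]
  exact List.getElem_mem hk

theorem pvHp_idx_mem (base hi : Int) (r : List Int) (s : Int) :
    ∀ p ∈ pvHp base hi r s, s ≤ -p.2 ∧ -p.2 < s + r.length := by
  intro p hp
  have := pvE_mem base r s p (List.mem_of_mem_filter hp)
  exact ⟨this.1, this.2.1⟩

theorem pvLp_idx_mem (base hi : Int) (r : List Int) (s : Int) :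
    ∀ p ∈ pvLp base hi r s, s ≤ -p.2 ∧ -p.2 < s + r.length := by
  intro p hp
  have := pvE_mem base r s p (List.mem_of_mem_filter hp)
  exact ⟨this.1, this.2.1⟩

theorem pvJ_idx_mem (base hi : Int) (r : List Int) (s : Int) (th tl : Nat) :
    ∀ x ∈ pvJ base hi r s th tl, s ≤ x ∧ x < s + r.length := by
  intro x hx
  simp only [pvJ, List.mem_map, List.mem_append] at hx
  obtain ⟨p, hp | hp, rfl⟩ := hx
  · exact pvHp_idx_mem base hi r s p (List.mem_of_mem_take hp)
  · exact pvLp_idx_mem base hi r s p (List.mem_of_mem_take hp)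

theorem pvSorted_char (base hi : Int) (r : List Int)
    (htwo : ∀ v ∈ r, v = hi ∨ v = hi - 1) (s : Int) :
    PySem.List.sorted2 (pvE base r s) (fun p => p.1) (fun p => p.2) true
      = pvHp base hi r s ++ pvLp base hi r s := by
  rw [pvSorted2_eq_sorted_lex]
  apply PySem.List.sorted_rev_eq_of_perm_of_pairwise_gt
  · exact List.filter_append_perm _ _
  · -- pairwise strictly lex-descending
    have hpairE : (pvE base r s).Pairwise (fun a b => b.2 < a.2) := by
      unfold pvE
      rw [List.pairwise_map]
      exact (PySem.List.pairwise_lt_enumerate r s).imp (by intro a b h; simpa using h)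
    have hhp : (pvHp base hi r s).Pairwise (fun a b => b.2 < a.2) :=
      hpairE.sublist List.filter_sublist |>.imp id
    have hlp : (pvLp base hi r s).Pairwise (fun a b => b.2 < a.2) :=
      hpairE.sublist List.filter_sublist |>.imp id
    rw [List.pairwise_append]
    refine ⟨?_, ?_, ?_⟩
    · refine hhp.imp_of_mem ?_
      intro a b ha hb h
      have ha1 : a.1 = hi - base := by simpa [pvHp] using (List.of_mem_filter ha)
      have hb1 : b.1 = hi - base := by simpa [pvHp] using (List.of_mem_filter hb)
      rw [Prod.Lex.lt_iff]
      exact Or.inr ⟨by simp [ha1, hb1], by simpa using h⟩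
    · refine hlp.imp_of_mem ?_
      intro a b ha hb h
      have ha1 : a.1 = hi - 1 - base := by
        have hne : ¬ a.1 = hi - base := by simpa [pvLp] using (List.of_mem_filter ha)
        have := (pvE_mem base r s a (List.mem_of_mem_filter ha)).2.2.2
        rcases htwo _ this with h1 | h1 <;> omega
      have hb1 : b.1 = hi - 1 - base := by
        have hne : ¬ b.1 = hi - base := by simpa [pvLp] using (List.of_mem_filter hb)
        have := (pvE_mem base r s b (List.mem_of_mem_filter hb)).2.2.2
        rcases htwo _ this with h1 | h1 <;> omega
      rw [Prod.Lex.lt_iff]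
      exact Or.inr ⟨by simp [ha1, hb1], by simpa using h⟩
    · intro a ha b hb
      have ha1 : a.1 = hi - base := by simpa [pvHp] using (List.of_mem_filter ha)
      have hb1 : b.1 = hi - 1 - base := by
        have hne : ¬ b.1 = hi - base := by simpa [pvLp] using (List.of_mem_filter hb)
        have := (pvE_mem base r s b (List.mem_of_mem_filter hb)).2.2.2
        rcases htwo _ this with h1 | h1 <;> omega
      rw [Prod.Lex.lt_iff]
      left
      show b.1 < a.1
      omega

theorem pvJ_count_zero (base hi : Int) (r : List Int) (s x : Int) (th tl : Nat)
    (hx : x < s) : (pvJ base hi r s th tl).count x = 0 := by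
  rw [List.count_eq_zero]
  intro hmem
  have := pvJ_idx_mem base hi r s th tl x hmem
  omega

theorem pvJ_cons_hi_succ (base hi v : Int) (hv : v = hi) (r : List Int) (s : Int) (t' tl : Nat) :
    pvJ base hi (v :: r) s (t' + 1) tl = s :: pvJ base hi r (s + 1) t' tl := by
  simp [pvJ, pvHp_cons, pvLp_cons, hv, List.take_succ_cons]

theorem pvJ_cons_hi_zero (base hi v : Int) (hv : v = hi) (r : List Int) (s : Int) (tl : Nat) :
    pvJ base hi (v :: r) s 0 tl = pvJ base hi r (s + 1) 0 tl := by
  simp [pvJ, pvHp_cons, pvLp_cons, hv]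

theorem pvJ_cons_lo_succ (base hi v : Int) (hv : ¬ v = hi) (r : List Int) (s : Int) (th t' : Nat) :
    pvJ base hi (v :: r) s th (t' + 1)
      = ((pvHp base hi r (s + 1)).take th).map (fun p => -p.2)
        ++ s :: ((pvLp base hi r (s + 1)).take t').map (fun p => -p.2) := by
  simp [pvJ, pvHp_cons, pvLp_cons, hv, List.take_succ_cons]

theorem pvJ_cons_lo_zero (base hi v : Int) (hv : ¬ v = hi) (r : List Int) (s : Int) (th : Nat) :
    pvJ base hi (v :: r) s th 0 = pvJ base hi r (s + 1) th 0 := by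
  simp [pvJ, pvHp_cons, pvLp_cons, hv]

theorem pvBumps_cons_hi (hi base th tl v : Int) (hv : v = hi) (r : List Int) :
    pvBumps hi base th tl (v :: r)
      = (base + if 0 < th then 1 else 0)
        :: pvBumps hi base (if 0 < th then th - 1 else th) tl r := by
  simp [pvBumps, hv]

theorem pvBumps_cons_lo (hi base th tl v : Int) (hv : ¬ v = hi) (r : List Int) :
    pvBumps hi base th tl (v :: r)
      = (base + if 0 < tl then 1 else 0)
        :: pvBumps hi base th (if 0 < tl then tl - 1 else tl) r := by
  simp [pvBumps, hv]

theorem pvJ_count (base hi : Int) : ∀ (r : List Int) (s : Int) (th tl : Nat),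
    (PySem.List.pyRange s (s + r.length) 1).map
        (fun i => base + ((pvJ base hi r s th tl).count i : Int))
      = pvBumps hi base (th : Int) (tl : Int) r := by
  intro r
  induction r with
  | nil =>
    intro s th tl
    rw [show ((s : Int) + ([] : List Int).length) = s by simp]
    simp [PySem.List.pyRange_one_eq_nil (le_refl s), pvBumps]
  | cons v r ih =>
    intro s th tl
    have hnn : (0 : Int) ≤ (r.length : Int) := by positivity
    have hlen : (s : Int) + (v :: r).length = (s + 1) + r.length := by simp; omega
    rw [hlen, PySem.List.pyRange_one_cons (by omega), List.map_cons]
    have htail : ∀ th' tl' : Nat,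
        (PySem.List.pyRange (s + 1) (s + 1 + r.length) 1).map
            (fun i => base + ((pvJ base hi r (s + 1) th' tl').count i : Int))
          = pvBumps hi base (th' : Int) (tl' : Int) r := fun th' tl' => ih (s + 1) th' tl'
    by_cases hv : v = hi
    · rw [pvBumps_cons_hi hi base _ _ v hv]
      cases th with
      | zero =>
        rw [pvJ_cons_hi_zero base hi v hv, if_neg (by simp)]
        rw [List.cons_eq_cons]
        refine ⟨?_, ?_⟩
        · rw [pvJ_count_zero base hi r (s + 1) s 0 tl (by omega)]; simp
        · simpa using htail 0 tl
      | succ t' =>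
        have h1 : (0 : Int) < ((t' + 1 : Nat) : Int) := by exact_mod_cast Nat.succ_pos t'
        rw [pvJ_cons_hi_succ base hi v hv, if_pos h1, if_pos h1,
          show ((t' + 1 : Nat) : Int) - 1 = (t' : Int) by push_cast; ring]
        rw [List.cons_eq_cons]
        refine ⟨?_, ?_⟩
        · rw [List.count_cons_self, pvJ_count_zero base hi r (s + 1) s t' tl (by omega)]
          simp
        · rw [← htail t' tl]
          apply List.map_congr_left
          intro i hi2
          rw [PySem.List.mem_pyRange_one] at hi2
          rw [List.count_cons_of_ne (by omega)]
    · rw [pvBumps_cons_lo hi base _ _ v hv]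
      cases tl with
      | zero =>
        rw [pvJ_cons_lo_zero base hi v hv, if_neg (by simp)]
        rw [List.cons_eq_cons]
        refine ⟨?_, ?_⟩
        · rw [pvJ_count_zero base hi r (s + 1) s th 0 (by omega)]; simp
        · simpa using htail th 0
      | succ t' =>
        have h1 : (0 : Int) < ((t' + 1 : Nat) : Int) := by exact_mod_cast Nat.succ_pos t'
        rw [pvJ_cons_lo_succ base hi v hv, if_pos h1, if_pos h1,
          show ((t' + 1 : Nat) : Int) - 1 = (t' : Int) by push_cast; ring]
        have hsplit : ∀ i : Int,
            (((pvHp base hi r (s + 1)).take th).map (fun p => -p.2)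
              ++ s :: ((pvLp base hi r (s + 1)).take t').map (fun p => -p.2)).count i
            = (if i = s then 1 else 0) + (pvJ base hi r (s + 1) th t').count i := by
          intro i
          rw [List.count_append, List.count_cons]
          unfold pvJ
          rw [List.map_append, List.count_append]
          by_cases h : i = s <;> simp [h] <;> omega
        rw [List.cons_eq_cons]
        refine ⟨?_, ?_⟩
        · rw [hsplit s, pvJ_count_zero base hi r (s + 1) s th t' (by omega)]
          simp
        · rw [← htail th t']
          apply List.map_congr_left
          intro i hi2
          rw [PySem.List.mem_pyRange_one] at hi2
          rw [hsplit i, if_neg (by omega)]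
          simp

theorem pvBumps_length (hi base : Int) : ∀ (r : List Int) (th tl : Int),
    (pvBumps hi base th tl r).length = r.length := by
  intro r
  induction r with
  | nil => intro th tl; simp [pvBumps]
  | cons v r ih =>
    intro th tl
    by_cases hv : v = hi
    · rw [pvBumps_cons_hi hi base th tl v hv]; simp [ih]
    · rw [pvBumps_cons_lo hi base th tl v hv]; simp [ih]

/-- the += 1 loop over a list of in-range indices adds the index's multiplicity everywhere -/
theorem pvInc_fold : ∀ (J : List Int) (al : List Int), (∀ x ∈ J, 0 ≤ x ∧ x < al.length) →
    J.foldl (fun al idx => PySem.List.pySetD al idx (PySem.List.pyGetD al idx 0 + 1)) al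
      = (PySem.List.pyRange 0 al.length 1).map
          (fun i => PySem.List.pyGetD al i 0 + (J.count i : Int)) := by
  intro J
  induction J with
  | nil =>
    intro al _
    simp only [List.foldl_nil, List.count_nil]
    rw [show (fun i => PySem.List.pyGetD al i 0 + ((0 : Nat) : Int))
        = fun i => PySem.List.pyGetD al i 0 by funext i; simp]
    exact (PySem.List.map_pyGetD_pyRange_zero' al 0).symm
  | cons j J ih =>
    intro al hrange
    have hj := hrange j (by simp)
    set al' := PySem.List.pySetD al j (PySem.List.pyGetD al j 0 + 1) with hal'
    have hlen : al'.length = al.length := PySem.List.length_pySetD al j _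
    rw [List.foldl_cons, ih al' (by rw [hlen]; intro x hx; exact hrange x (by simp [hx]))]
    rw [hlen]
    apply List.map_congr_left
    intro i hi
    rw [PySem.List.mem_pyRange_one] at hi
    have hget : PySem.List.pyGetD al' i 0
        = if i = j then PySem.List.pyGetD al j 0 + 1 else PySem.List.pyGetD al i 0 := by
      rw [hal', show (j : Int) = ((j.toNat : Nat) : Int) by omega,
        show (i : Int) = ((i.toNat : Nat) : Int) by omega,
        PySem.List.pyGetD_pySetD_natCast al j.toNat i.toNat _ 0 (by omega)]
      by_cases h : i = j
      · rw [if_pos (by omega), if_pos (by rw [h])]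
      · rw [if_neg (by omega), if_neg (by omega)]
    rw [hget]
    by_cases h : i = j
    · rw [if_pos h, h, List.count_cons_self]
      push_cast
      omega
    · rw [if_neg h, List.count_cons_of_ne (Ne.symm h)]

/-- B's per-day scan is `pvBumps` together with the pointwise new remaining list -/
theorem pvB_fold (hi base : Int) : ∀ (r : List Int) (th tl : Int) (row rr : List Int),
    (r.foldl (fun (st : Int × Int × List Int × List Int) v =>
      if v = hi then
        let bump : Int := if 0 < st.1 then 1 else 0
        (st.1 - bump, st.2.1, st.2.2.1 ++ [base + bump], st.2.2.2 ++ [v - (base + bump)])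
      else
        let bump : Int := if 0 < st.2.1 then 1 else 0
        (st.1, st.2.1 - bump, st.2.2.1 ++ [base + bump], st.2.2.2 ++ [v - (base + bump)]))
      (th, tl, row, rr)).2.2.1 = row ++ pvBumps hi base th tl r
    ∧ (r.foldl (fun (st : Int × Int × List Int × List Int) v =>
      if v = hi then
        let bump : Int := if 0 < st.1 then 1 else 0
        (st.1 - bump, st.2.1, st.2.2.1 ++ [base + bump], st.2.2.2 ++ [v - (base + bump)])
      else
        let bump : Int := if 0 < st.2.1 then 1 else 0
        (st.1, st.2.1 - bump, st.2.2.1 ++ [base + bump], st.2.2.2 ++ [v - (base + bump)]))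
      (th, tl, row, rr)).2.2.2
        = rr ++ List.zipWith (fun v a => v - a) r (pvBumps hi base th tl r) := by
  intro r
  induction r with
  | nil => intro th tl row rr; simp [pvBumps]
  | cons v r ih =>
    intro th tl row rr
    by_cases hv : v = hi
    · rw [pvBumps_cons_hi hi base th tl v hv]
      by_cases hth : 0 < th
      · simpa [hv, hth, List.zipWith] using ih (th - 1) tl (row ++ [base + 1]) (rr ++ [v - (base + 1)])
      · simpa [hv, hth, List.zipWith] using ih th tl (row ++ [base + 0]) (rr ++ [v - (base + 0)])
    · rw [pvBumps_cons_lo hi base th tl v hv]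
      by_cases htl : 0 < tl
      · simpa [hv, htl, List.zipWith] using ih th (tl - 1) (row ++ [base + 1]) (rr ++ [v - (base + 1)])
      · simpa [hv, htl, List.zipWith] using ih th tl (row ++ [base + 0]) (rr ++ [v - (base + 0)])

/-- `max(r)` on a list whose values span two adjacent integers -/
theorem pvMax_char (r : List Int) (hne : r ≠ []) (m : Int)
    (htwo : ∀ v ∈ r, v = m ∨ v = m + 1) :
    ∀ v ∈ r, v = (PySem.List.max? r (fun v => v)).getD 0
      ∨ v = (PySem.List.max? r (fun v => v)).getD 0 - 1 := by
  cases h : PySem.List.max? r (fun v => v) with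
  | none => exact absurd ((PySem.List.max?_eq_none_iff r _).mp h) hne
  | some M =>
    have hM := PySem.List.max?_mem h
    have hmax := PySem.List.max?_isMax h
    intro v hv
    simp only [Option.getD_some]
    rcases htwo M hM with h1 | h1
    · rcases htwo v hv with h2 | h2
      · left; omega
      · have := hmax v hv; simp at this; omega
    · rcases htwo v hv with h2 | h2
      · right; omega
      · left; omega

/-- tl = 0: the new remaining values again span two adjacent integers -/
theorem pvPreserve_tl0 (hi base : Int) : ∀ (r : List Int) (th : Int),
    (∀ v ∈ r, v = hi ∨ v = hi - 1) →
    ∀ x ∈ List.zipWith (fun v a => v - a) r (pvBumps hi base th 0 r),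
      x = (hi - base - 1) ∨ x = (hi - base - 1) + 1 := by
  intro r
  induction r with
  | nil => intro th _ x hx; simp [pvBumps] at hx
  | cons v r ih =>
    intro th htwo x hx
    by_cases hv : v = hi
    · rw [pvBumps_cons_hi hi base th 0 v hv] at hx
      simp only [List.zipWith_cons_cons, List.mem_cons] at hx
      rcases hx with rfl | hx
      · by_cases hth : 0 < th
        · rw [if_pos hth]; left; omega
        · rw [if_neg hth]; right; omega
      · exact ih _ (fun w hw => htwo w (by simp [hw])) x hx
    · rw [pvBumps_cons_lo hi base th 0 v hv, if_neg (by norm_num), if_neg (by norm_num)] at hx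
      simp only [List.zipWith_cons_cons, List.mem_cons] at hx
      have hv1 : v = hi - 1 := by
        rcases htwo v (by simp) with h1 | h1
        · exact absurd h1 hv
        · exact h1
      rcases hx with rfl | hx
      · left; omega
      · exact ih _ (fun w hw => htwo w (by simp [hw])) x hx

/-- all hi entries bumped (count hi ≤ th): values span two adjacent integers one lower -/
theorem pvPreserve_full (hi base : Int) : ∀ (r : List Int) (th tl : Int),
    (∀ v ∈ r, v = hi ∨ v = hi - 1) → ((r.count hi : Int) ≤ th) →
    ∀ x ∈ List.zipWith (fun v a => v - a) r (pvBumps hi base th tl r),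
      x = (hi - base - 2) ∨ x = (hi - base - 2) + 1 := by
  intro r
  induction r with
  | nil => intro th tl _ _ x hx; simp [pvBumps] at hx
  | cons v r ih =>
    intro th tl htwo hcnt x hx
    by_cases hv : v = hi
    · have hc : (r.count hi : Int) + 1 ≤ th := by
        simp only [hv, List.count_cons_self] at hcnt
        push_cast at hcnt
        omega
      have hth : 0 < th := by
        have : (0 : Int) ≤ (r.count hi : Int) := by positivity
        omega
      rw [pvBumps_cons_hi hi base th tl v hv, if_pos hth, if_pos hth] at hx
      simp only [List.zipWith_cons_cons, List.mem_cons] at hx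
      rcases hx with rfl | hx
      · right; omega
      · exact ih (th - 1) tl (fun w hw => htwo w (by simp [hw])) (by omega) x hx
    · have hc : (r.count hi : Int) ≤ th := by
        rw [List.count_cons_of_ne hv] at hcnt
        omega
      rw [pvBumps_cons_lo hi base th tl v hv] at hx
      simp only [List.zipWith_cons_cons, List.mem_cons] at hx
      have hv1 : v = hi - 1 := by
        rcases htwo v (by simp) with h1 | h1
        · exact absurd h1 hv
        · exact h1
      rcases hx with rfl | hx
      · by_cases htl : 0 < tl
        · rw [if_pos htl]; left; omega
        · rw [if_neg htl]; right; omega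
      · exact ih th _ (fun w hw => htwo w (by simp [hw])) hc x hx

theorem pvGetD_take {α : Type} (xs : List α) (t : Nat) (k : Int) (d : α)
    (h0 : 0 ≤ k) (h1 : k < (t : Int)) (h2 : k < (xs.length : Int)) :
    PySem.List.pyGetD (xs.take t) k d = PySem.List.pyGetD xs k d := by
  rw [PySem.List.pyGetD_eq_getElem _ d h0 (by simp only [List.length_take]; push_cast; omega),
    PySem.List.pyGetD_eq_getElem _ d h0 (by omega), List.getElem_take]

theorem pvGetD_replicate (t : Nat) (b : Int) (i : Int)
    (h0 : 0 ≤ i) (h1 : i < (t : Int)) :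
    PySem.List.pyGetD (List.replicate t b) i 0 = b := by
  rw [PySem.List.pyGetD_eq_getElem _ 0 h0 (by simpa using h1)]
  simp

theorem pvHp_length (base hi : Int) (r : List Int) (s : Int) :
    (pvHp base hi r s).length = List.count hi r := by
  unfold pvHp pvE
  rw [← List.countP_eq_length_filter, List.countP_map]
  have h1 : ((fun p => decide (p.1 = hi - base)) ∘ (fun (p : Int × Int) => (p.2 - base, -p.1)))
      = fun (p : Int × Int) => decide (p.2 = hi) := by
    funext p
    simp only [Function.comp]
    by_cases h : p.2 = hi
    · simp [h]
    · simp [h]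
  rw [h1]
  have h2 : List.countP (fun (p : Int × Int) => decide (p.2 = hi)) (PySem.List.enumerate r s)
      = List.countP (fun v => decide (v = hi)) ((PySem.List.enumerate r s).map (fun p => p.2)) := by
    rw [List.countP_map]; rfl
  rw [h2, PySem.List.map_snd_enumerate, List.count]
  apply List.countP_congr
  intro v _
  simp

theorem pvDay_eq (n : Int) (hn : 2 ≤ n) (target_per cur r : List Int)
    (hlen : r.length = n.toNat)
    (hr : (PySem.List.pyRange 0 n 1).map
        (fun i => PySem.List.pyGetD target_per i 0 - PySem.List.pyGetD cur i 0) = r)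
    (hi : Int) (hhi : ∀ v ∈ r, v = hi ∨ v = hi - 1) (T : Int)
    (th tl : Int)
    (hth : th = if PySem.Int.mod T n < (List.count hi r : Int)
        then PySem.Int.mod T n else (List.count hi r : Int))
    (htl : tl = PySem.Int.mod T n - th) :
    pvA_day n target_per cur T = pvBumps hi (PySem.Int.floordiv T n) th tl r := by
  have hn0 : (0 : Int) < n := by omega
  set base := PySem.Int.floordiv T n with hbase
  set rem := PySem.Int.mod T n with hrem
  have hrb : 0 ≤ rem ∧ rem < n := by
    rw [hrem, PySem.Int.mod_eq_emod_of_pos hn0]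
    exact ⟨Int.emod_nonneg T (by omega), Int.emod_lt_of_pos T hn0⟩
  have hcast : ((n.toNat : Nat) : Int) = n := by omega
  -- the deficit list is pvE base r 0
  have hdef : (PySem.List.pyRange 0 n 1).map (fun i =>
      (PySem.List.pyGetD target_per i 0 - PySem.List.pyGetD cur i 0 - base, -i))
        = pvE base r 0 := by
    unfold pvE
    rw [PySem.List.enumerate_eq_map_pyRange r 0, List.map_map]
    unfold PySem.List.len
    rw [hlen, hcast]
    apply List.map_congr_left
    intro i hmem
    rw [PySem.List.mem_pyRange_one] at hmem
    have : PySem.List.pyGetD r i 0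
        = PySem.List.pyGetD target_per i 0 - PySem.List.pyGetD cur i 0 := by
      conv_lhs => rw [← hr]
      rw [PySem.List.pyGetD_map_pyRange_of_nonneg _ n i 0 hmem.1 hmem.2]
    simp [Function.comp, this]
  -- lengths
  have hhp := pvHp_length base hi r 0
  have hLlen : (pvHp base hi r 0 ++ pvLp base hi r 0).length = n.toNat := by
    unfold pvHp pvLp
    rw [(List.filter_append_perm _ (pvE base r 0)).length_eq]
    unfold pvE
    simp [PySem.List.length_enumerate, hlen]
  unfold pvA_day
  simp only []
  rw [hdef, pvSorted_char base hi r hhi 0]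
  set L := pvHp base hi r 0 ++ pvLp base hi r 0 with hL
  -- replace the indexed reads by reads of the rem-prefix
  have hcongr : ∀ (al : List Int), ∀ k ∈ PySem.List.pyRange 0 rem 1,
      (PySem.List.pySetD al (-(PySem.List.pyGetD L k (0, 0)).2)
        (PySem.List.pyGetD al (-(PySem.List.pyGetD L k (0, 0)).2) 0 + 1))
      = (PySem.List.pySetD al (-(PySem.List.pyGetD (L.take rem.toNat) k (0, 0)).2)
        (PySem.List.pyGetD al (-(PySem.List.pyGetD (L.take rem.toNat) k (0, 0)).2) 0 + 1)) := by
    intro al k hk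
    rw [PySem.List.mem_pyRange_one] at hk
    rw [pvGetD_take L rem.toNat k (0,0) hk.1 (by omega) (by rw [hLlen]; omega)]
  rw [PySem.List.foldl_congr_mem _ _ _ _ hcongr]
  have hlentake : (((L.take rem.toNat).length : Nat) : Int) = rem := by
    simp only [List.length_take, hLlen]
    omega
  rw [show PySem.List.pyRange 0 rem 1 = PySem.List.pyRange 0 ((L.take rem.toNat).length : Int) 1
      by rw [hlentake]]
  rw [PySem.List.foldl_pyRange_zero_pyGetD' (L.take rem.toNat) ((0 : Int), (0 : Int))
      (fun al p => PySem.List.pySetD al (-p.2) (PySem.List.pyGetD al (-p.2) 0 + 1)) _]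
  -- turn the pair fold into a fold over the bumped indices pvJ
  have hJ : (L.take rem.toNat).map (fun p => -p.2) = pvJ base hi r 0 th.toNat tl.toNat := by
    rw [hL, List.take_append]
    unfold pvJ
    congr 2
    · by_cases h : rem < (List.count hi r : Int)
      · rw [hth, if_pos h] at *
      · rw [hth, if_neg h] at *
        rw [List.take_of_length_le (by omega), List.take_of_length_le (by omega)]
    · by_cases h : rem < (List.count hi r : Int)
      · rw [hth, if_pos h] at htl
        rw [show rem.toNat - (pvHp base hi r 0).length = 0 by omega,
          show tl.toNat = 0 by omega]
      · rw [hth, if_neg h] at htl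
        congr 1
        omega
  have hth0 : 0 ≤ th := by
    have hc0 : (0 : Int) ≤ (List.count hi r : Int) := by positivity
    rw [hth]; split_ifs <;> omega
  have htl0 : 0 ≤ tl := by
    have hc0 : (0 : Int) ≤ (List.count hi r : Int) := by positivity
    rw [htl, hth]; split_ifs <;> omega
  have hfold : (List.take rem.toNat L).foldl
      (fun al p => PySem.List.pySetD al (-p.2) (PySem.List.pyGetD al (-p.2) 0 + 1))
      (List.replicate n.toNat base)
      = (pvJ base hi r 0 th.toNat tl.toNat).foldl
        (fun al idx => PySem.List.pySetD al idx (PySem.List.pyGetD al idx 0 + 1))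
        (List.replicate n.toNat base) := by
    rw [← hJ, List.foldl_map]
  rw [show List.replicate n.toNat (PySem.Int.floordiv T n) = List.replicate n.toNat base from rfl,
    hfold,
    pvInc_fold (pvJ base hi r 0 th.toNat tl.toNat) (List.replicate n.toNat base) (by
      intro x hx
      have := pvJ_idx_mem base hi r 0 th.toNat tl.toNat x hx
      simp only [List.length_replicate]
      omega)]
  have hcnt := pvJ_count base hi r 0 th.toNat tl.toNat
  rw [show ((0:Int) + ((r.length : Nat) : Int)) = ((n.toNat : Nat) : Int) by rw [hlen]; ring,
    show ((th.toNat : Nat) : Int) = th by omega,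
    show ((tl.toNat : Nat) : Int) = tl by omega] at hcnt
  rw [List.length_replicate, ← hcnt]
  apply List.map_congr_left
  intro i hmem
  rw [PySem.List.mem_pyRange_one] at hmem
  rw [pvGetD_replicate n.toNat base i hmem.1 hmem.2]

theorem pvB_day_eq (n : Int) (r : List Int) (T : Int) (hi th tl : Int)
    (hhi : hi = (PySem.List.max? r (fun v => v)).getD 0)
    (hth : th = if PySem.Int.mod T n < ((PySem.List.count r hi : Nat) : Int)
        then PySem.Int.mod T n else ((PySem.List.count r hi : Nat) : Int))
    (htl : tl = PySem.Int.mod T n - th) :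
    (pvB_day n r T).2.2.1 = pvBumps hi (PySem.Int.floordiv T n) th tl r
    ∧ (pvB_day n r T).2.2.2
        = List.zipWith (fun v a => v - a) r
            (pvBumps hi (PySem.Int.floordiv T n) th tl r) := by
  have h := pvB_fold hi (PySem.Int.floordiv T n) r th tl [] []
  unfold pvB_day
  simp only []
  rw [← hhi, ← hth, ← htl]
  simpa using h

theorem pvRel_step (n : Int) (tgt cur racc B : List Int)
    (hlen : racc.length = n.toNat) (hBlen : B.length = n.toNat)
    (hrel : (PySem.List.pyRange 0 n 1).map
        (fun i => PySem.List.pyGetD tgt i 0 - PySem.List.pyGetD cur i 0) = racc) :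
    (PySem.List.pyRange 0 n 1).map (fun i => PySem.List.pyGetD tgt i 0
        - PySem.List.pyGetD ((PySem.List.pyRange 0 n 1).map
            (fun i => PySem.List.pyGetD cur i 0 + PySem.List.pyGetD B i 0)) i 0)
      = List.zipWith (fun v a => v - a) racc B := by
  apply List.ext_getElem
  · simp [PySem.List.length_pyRange_one, hlen, hBlen]
  · intro k h1 h2
    have hk : k < n.toNat := by
      simpa [PySem.List.length_pyRange_one] using h1
    have hkn : (k : Int) < n := by omega
    have hk0 : (0 : Int) ≤ (k : Int) := by positivity
    rw [List.getElem_map, PySem.List.getElem_pyRange_one, List.getElem_zipWith]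
    rw [show (0 : Int) + (k : Int) = (k : Int) by ring]
    rw [PySem.List.pyGetD_map_pyRange_of_nonneg _ n _ 0 hk0 hkn]
    have hracc : PySem.List.pyGetD racc (k : Int) 0 = racc[k]'(by omega) :=
      PySem.List.pyGetD_eq_getElem racc 0 hk0 (by omega)
    have hB : PySem.List.pyGetD B (k : Int) 0 = B[k]'(by omega) :=
      PySem.List.pyGetD_eq_getElem B 0 hk0 (by omega)
    have htc : PySem.List.pyGetD tgt (k : Int) 0 - PySem.List.pyGetD cur (k : Int) 0
        = PySem.List.pyGetD racc (k : Int) 0 := by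
      conv_rhs => rw [← hrel]
      rw [PySem.List.pyGetD_map_pyRange_of_nonneg _ n _ 0 hk0 hkn]
    rw [hB]
    omega

theorem pvMain (n : Int) (hn : 2 ≤ n) (target_per : List Int) :
    ∀ (dts : List Int) (cur racc : List Int) (acc : List (List Int)),
    racc.length = n.toNat →
    (PySem.List.pyRange 0 n 1).map
        (fun i => PySem.List.pyGetD target_per i 0 - PySem.List.pyGetD cur i 0) = racc →
    (∃ m, ∀ v ∈ racc, v = m ∨ v = m + 1) →
    (dts.foldl (fun (st : List Int × List (List Int)) T =>
        let alloc := pvA_day n target_per st.1 T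
        ((PySem.List.pyRange 0 n 1).map (fun i =>
            PySem.List.pyGetD st.1 i 0 + PySem.List.pyGetD alloc i 0),
         st.2 ++ [alloc])) (cur, acc)).2
      = (dts.foldl (fun (st : List Int × List (List Int)) T =>
          let res := pvB_day n st.1 T
          (res.2.2.2, st.2 ++ [res.2.2.1])) (racc, acc)).2 := by
  intro dts
  induction dts with
  | nil => intro cur racc acc _ _ _; simp
  | cons T dts ih =>
    rintro cur racc acc hlen hrel ⟨m, htwo⟩
    have hne : racc ≠ [] := by
      intro h
      rw [h] at hlen
      simp at hlen
      omega
    set hi := (PySem.List.max? racc (fun v => v)).getD 0 with hhi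
    have hhiv : ∀ v ∈ racc, v = hi ∨ v = hi - 1 := pvMax_char racc hne m htwo
    set base := PySem.Int.floordiv T n with hbase
    set rem := PySem.Int.mod T n with hrem
    set cInt := (List.count hi racc : Int) with hcInt
    set th := if rem < cInt then rem else cInt with hth
    set tl := rem - th with htl
    set B := pvBumps hi base th tl racc with hB
    have hrb : 0 ≤ rem ∧ rem < n := by
      rw [hrem, PySem.Int.mod_eq_emod_of_pos (by omega)]
      exact ⟨Int.emod_nonneg T (by omega), Int.emod_lt_of_pos T (by omega)⟩
    have hA : pvA_day n target_per cur T = B :=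
      pvDay_eq n hn target_per cur racc hlen hrel hi hhiv T th tl hth htl
    have hBd := pvB_day_eq n racc T hi th tl hhi
      (by rw [hth, hcInt, PySem.List.count_eq, hrem]) (by rw [htl, hrem])
    have hBlen : B.length = n.toNat := by rw [hB, pvBumps_length, hlen]
    have hzlen : (List.zipWith (fun v a => v - a) racc B).length = n.toNat := by
      simp [hlen, hBlen]
    have hpres : ∃ m', ∀ v ∈ List.zipWith (fun v a => v - a) racc B, v = m' ∨ v = m' + 1 := by
      by_cases h : rem < cInt
      · refine ⟨hi - base - 1, ?_⟩
        have htl0 : tl = 0 := by rw [htl, hth, if_pos h]; ring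
        rw [hB, htl0]
        exact pvPreserve_tl0 hi base racc th hhiv
      · refine ⟨hi - base - 2, ?_⟩
        have hthc : th = cInt := by rw [hth, if_neg h]
        rw [hB]
        exact pvPreserve_full hi base racc th tl hhiv (by rw [hthc, hcInt]) 
    simp only [List.foldl_cons]
    rw [hA, hBd.1, hBd.2]
    exact ih _ _ _ hzlen
      (pvRel_step n target_per cur racc B hlen hBlen hrel) hpres

theorem pvFinal : ∀ (daily_totals : List Int) (n : Int),
    fair_daily_spot_allocations_py daily_totals n
      = fair_daily_spot_allocations_py_alt daily_totals n := by
  intro dts n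
  unfold fair_daily_spot_allocations_py fair_daily_spot_allocations_py_alt
  by_cases h0 : n ≤ 0
  · rw [if_pos h0, if_pos h0]
  by_cases h1 : n = 1
  · rw [if_neg h0, if_pos h1, if_neg h0, if_pos h1]
  have hn : 2 ≤ n := by omega
  rw [if_neg h0, if_neg h1, if_neg h0, if_neg h1]
  simp only []
  set total := dts.foldl (fun s x => s + x) 0 with htotal
  set q := PySem.Int.floordiv total n with hq
  set rr := PySem.Int.mod total n with hrr
  apply pvMain n hn _ dts _ _ []
  · simp [PySem.List.length_pyRange_one]
  · apply List.map_congr_left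
    intro i hm
    rw [PySem.List.mem_pyRange_one] at hm
    rw [PySem.List.pyGetD_map_pyRange_of_nonneg _ n _ 0 hm.1 hm.2,
      pvGetD_replicate n.toNat 0 i hm.1 (by omega)]
    split_ifs <;> ring
  · refine ⟨q, ?_⟩
    intro v hv
    rw [List.mem_map] at hv
    obtain ⟨i, _, rfl⟩ := hv
    by_cases h : i < rr
    · rw [if_pos h]; right; ring
    · rw [if_neg h]; left; ring

-- ===== VERDICT (by name: the statement is the Claim_ definition above) =====
theorem fair_daily_spot_allocations_py_spec : Claim_equal_fair_daily_spot_allocations_py := by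
  intro daily_totals n _
  unfold Spec_fair_daily_spot_allocations_py
  exact pvFinal daily_totals n
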